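-- pv_equiv track=rewrite | github.com/aidos-lab/Topo_LLM_public | topollm/path_management/convert_object_to_valid_path_part.py | validate_path_part
-- ===== SOURCE A (Python) =====
-- def validate_path_part(
--     path_part: str,
-- ) -> bool:
--     """Validate if a string is suitable for file paths.
--
--     This also checks for common issues that would appear when using gsutil for Google Cloud bucket operations,
--     in particular, the following characters are not allowed because they might be interpreted as wildcard:
--     `*`, `?`, `[`, `]`.
--     Also see the following discussions:
--     - https://stackoverflow.com/questions/42087510/gsutil-ls-returns-error-contains-wildcard
--     - https://github.com/GoogleCloudPlatform/gsutil/issues/290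
--     - https://cloud.google.com/storage/docs/gsutil/addlhelp/WildcardNames
--     """
--     # Check if the path part is a string
--     if not isinstance(
--         path_part,
--         str,
--     ):
--         return False
--
--     gsutil_wildcard_characters = ["*", "?", "[", "]"]
--
--     # Check if the path part does not contain any of the following characters
--     if any(char in path_part for char in gsutil_wildcard_characters):
--         return False
--     return True
-- ===== SOURCE B (Python) =====
-- def validate_path_part(path_part) -> bool:
--     # non-strings are never valid path parts
--     if not isinstance(path_part, str):
--         return False
--     # delete every wildcard character; the part is valid iff nothing was deleted
--     stripped = path_part.translate(str.maketrans("", "", "*?[]"))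
--     return len(stripped) == len(path_part)
-- ===== Notes on version B (the rewrite author's own statement) =====
-- stated objective: alternative
-- what changed: Instead of scanning the string once per wildcard with any(), B deletes all wildcard characters in one translate pass and declares the string valid iff its length is unchanged.
import Mathlib
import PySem

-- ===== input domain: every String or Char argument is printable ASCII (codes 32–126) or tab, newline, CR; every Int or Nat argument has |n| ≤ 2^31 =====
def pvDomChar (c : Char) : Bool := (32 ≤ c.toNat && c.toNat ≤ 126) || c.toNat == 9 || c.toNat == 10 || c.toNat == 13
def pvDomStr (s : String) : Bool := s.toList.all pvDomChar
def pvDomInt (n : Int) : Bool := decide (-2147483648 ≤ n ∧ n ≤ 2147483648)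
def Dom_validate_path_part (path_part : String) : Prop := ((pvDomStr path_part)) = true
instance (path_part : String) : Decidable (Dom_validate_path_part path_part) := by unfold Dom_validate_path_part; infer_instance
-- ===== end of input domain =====

-- B deletes the wildcard characters in one translate pass and tests that the length is
-- unchanged, instead of A's any()-scan of the string once per wildcard (objective: alternative).

-- ===== PORT A =====
-- 'char in path_part' with a 1-character char = character membership in the string;
-- the isinstance check is always true for a String argument
def validate_path_part (path_part : String) : Bool :=
  if (['*', '?', '[', ']'].any (fun c => path_part.toList.contains c)) then
    false
  else
    true

-- ===== PORT B =====
-- str.translate with a deletion table = filter keeping the characters not in the wildcard set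
def validate_path_part_alt (path_part : String) : Bool :=
  let stripped := path_part.toList.filter (fun c => !(['*', '?', '[', ']'].contains c))
  stripped.length == path_part.toList.length

-- ===== PRECONDITION & SPEC =====
def Spec_validate_path_part (path_part : String) (out : Bool) : Prop := out = validate_path_part_alt path_part
instance (path_part : String) (out : Bool) : Decidable (Spec_validate_path_part path_part out) := by unfold Spec_validate_path_part; infer_instance

-- ===== CLAIM (what is proved, stated in full; the proofs are below) =====
def Claim_equal_validate_path_part : Prop := ∀ (path_part : String), Dom_validate_path_part path_part → Spec_validate_path_part path_part (validate_path_part path_part)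

-- ===== LEMMAS AND PROOFS =====
theorem validate_path_part_eq (s : String) :
    validate_path_part s = validate_path_part_alt s := by
  unfold validate_path_part validate_path_part_alt
  by_cases h : ∃ c ∈ (['*', '?', '[', ']'] : List Char), c ∈ s.toList
  · rw [if_pos (by simpa [List.any_eq_true] using h)]
    rw [eq_comm, Bool.eq_false_iff]
    intro htrue
    obtain ⟨c, hc, hcs⟩ := h
    simp only [beq_iff_eq] at htrue
    have hall := List.length_filter_eq_length_iff.mp htrue
    have := hall c hcs
    simp only [Bool.not_eq_eq_eq_not, Bool.not_true, List.contains_eq_mem,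
      decide_eq_false_iff_not] at this
    exact this hc
  · rw [if_neg (by simpa [List.any_eq_true] using h)]
    symm
    simp only [beq_iff_eq]
    refine List.length_filter_eq_length_iff.mpr ?_
    intro a ha
    simp only [Bool.not_eq_eq_eq_not, Bool.not_true, List.contains_eq_mem,
      decide_eq_false_iff_not]
    intro hmem
    exact h ⟨a, hmem, ha⟩

-- ===== VERDICT (by name: the statement is the Claim_ definition above) =====
theorem validate_path_part_spec : Claim_equal_validate_path_part := by
  intro s _
  show validate_path_part s = validate_path_part_alt s
  exact validate_path_part_eq s
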